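-- pv_equiv track=rewrite | github.com/raquelvcorreia/Biology_Related_Project | Algorithms for DNA Sequencing/Module 2/week2_DNA_algorithms.py | naive_hamming
-- ===== SOURCE A (Python) =====
-- def naive_hamming(p, t, max_dist):
--     occurrences = []
--     for i in range(len(t) - len(p) + 1):  # loop over alignments
--         nmm = 0
--         match = True
--         for j in range(len(p)):  # loop over characters
--             if t[i + j] != p[j]:  # compare characters
--                 nmm += 1
--                 if nmm > max_dist:
--                     break
--         if nmm <= max_dist:
--             occurrences.append(i)  # approx match
--     return occurrences
-- ===== SOURCE B (Python) =====
-- def naive_hamming(p, t, max_dist):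
--     n = len(t) - len(p) + 1
--     if n <= 0:
--         return []
--     nmm = [0] * n  # mismatch count per alignment
--     for j, pj in enumerate(p):  # accumulate column by column
--         nmm = [c + (t[i + j] != pj) for i, c in enumerate(nmm)]
--     return [i for i in range(n) if nmm[i] <= max_dist]
-- ===== Notes on version B (the rewrite author's own statement) =====
-- stated objective: alternative
-- what changed: B reverses the loop nesting: it maintains a vector of mismatch counts, one per alignment, accumulated column-by-column over pattern offsets (rebuilding the vector by a comprehension each column), then filters alignments by the threshold, instead of A's per-alignment scalar count with an early break.
import Mathlib
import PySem

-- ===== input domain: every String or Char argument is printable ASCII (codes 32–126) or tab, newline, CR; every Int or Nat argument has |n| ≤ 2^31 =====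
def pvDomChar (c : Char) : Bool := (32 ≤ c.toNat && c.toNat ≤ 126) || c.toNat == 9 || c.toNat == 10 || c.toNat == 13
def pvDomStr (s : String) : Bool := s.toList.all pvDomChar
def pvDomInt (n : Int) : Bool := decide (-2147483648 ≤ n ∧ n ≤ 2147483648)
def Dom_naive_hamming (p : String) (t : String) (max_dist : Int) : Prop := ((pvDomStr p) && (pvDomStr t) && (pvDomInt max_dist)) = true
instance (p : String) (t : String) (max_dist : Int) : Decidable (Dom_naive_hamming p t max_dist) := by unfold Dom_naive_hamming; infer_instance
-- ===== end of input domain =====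

-- B reverses the loop nesting: a vector of per-alignment mismatch counts accumulated
-- column-by-column over pattern offsets, then filtered by the threshold (alternative, same cost).

-- ===== PORT A =====
def naive_hamming (p : String) (t : String) (max_dist : Int) : List Int :=
  (PySem.List.pyRange 0 ((t.toList.length : Int) - (p.toList.length : Int) + 1) 1).foldl
    (fun occurrences i =>
      let st := (PySem.List.pyRange 0 ((p.toList.length : Int)) 1).foldl
        (fun st j =>
          if st.2 then st  -- 'break' already taken: rest of the inner loop is skipped
          else if PySem.List.pyGet? t.toList (i + j) ≠ PySem.List.pyGet? p.toList j then
            if st.1 + 1 > max_dist then (st.1 + 1, true) else (st.1 + 1, false)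
          else st)
        ((0 : Int), false)
      if st.1 ≤ max_dist then occurrences ++ [i] else occurrences)
    []

-- ===== PORT B =====
def naive_hamming_alt (p : String) (t : String) (max_dist : Int) : List Int :=
  let n : Int := (t.toList.length : Int) - (p.toList.length : Int) + 1
  if n ≤ 0 then []
  else
    let nmm := (PySem.List.enumerate p.toList 0).foldl
      (fun nmm jp =>
        (PySem.List.enumerate nmm 0).map
          (fun ic => ic.2 + if PySem.List.pyGet? t.toList (ic.1 + jp.1) ≠ some jp.2 then 1 else 0))
      (List.replicate n.toNat (0 : Int))
    (PySem.List.pyRange 0 n 1).filter (fun i => PySem.List.pyGetD nmm i 0 ≤ max_dist)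

-- ===== PRECONDITION & SPEC =====
def Spec_naive_hamming (p : String) (t : String) (max_dist : Int) (out : List Int) : Prop := out = naive_hamming_alt p t max_dist
instance (p : String) (t : String) (max_dist : Int) (out : List Int) : Decidable (Spec_naive_hamming p t max_dist out) := by unfold Spec_naive_hamming; infer_instance

-- ===== CLAIM (what is proved, stated in full; the proofs are below) =====
def Claim_equal_naive_hamming : Prop := ∀ (p : String) (t : String) (max_dist : Int), Dom_naive_hamming p t max_dist → Spec_naive_hamming p t max_dist (naive_hamming p t max_dist)

-- ===== LEMMAS AND PROOFS =====

-- the mismatch indicator at alignment i, pattern offset j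
def pvMis (tl pl : List Char) (i j : Int) : Int :=
  if PySem.List.pyGet? tl (i + j) ≠ PySem.List.pyGet? pl j then 1 else 0

-- A's inner-loop step (definitionally the lambda inside naive_hamming)
def pvStepA (tl pl : List Char) (md i : Int) (st : Int × Bool) (j : Int) : Int × Bool :=
  if st.2 then st
  else if PySem.List.pyGet? tl (i + j) ≠ PySem.List.pyGet? pl j then
    if st.1 + 1 > md then (st.1 + 1, true) else (st.1 + 1, false)
  else st

theorem pvMis_nonneg (tl pl : List Char) (i j : Int) : 0 ≤ pvMis tl pl i j := by
  unfold pvMis; split <;> norm_num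

theorem pvSum_nonneg (tl pl : List Char) (i : Int) (L : List Int) :
    0 ≤ (L.map (pvMis tl pl i)).sum := by
  apply List.sum_nonneg
  intro x hx
  obtain ⟨j, _, rfl⟩ := List.mem_map.mp hx
  exact pvMis_nonneg tl pl i j

theorem pvStuck (tl pl : List Char) (md i c : Int) (L : List Int) :
    L.foldl (pvStepA tl pl md i) (c, true) = (c, true) := by
  induction L with
  | nil => rfl
  | cons x L ih =>
    rw [List.foldl_cons, show pvStepA tl pl md i (c, true) x = (c, true) from by simp [pvStepA]]
    exact ih

-- A's early-break count passes the threshold iff the full mismatch count does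
theorem pvInner_le_iff (tl pl : List Char) (md i : Int) (L : List Int) (c : Int) :
    ((L.foldl (pvStepA tl pl md i) (c, false)).1 ≤ md ↔
      c + (L.map (pvMis tl pl i)).sum ≤ md) := by
  induction L generalizing c with
  | nil => simp
  | cons j L ih =>
    have hs := pvSum_nonneg tl pl i L
    rw [List.foldl_cons, List.map_cons, List.sum_cons]
    by_cases h : PySem.List.pyGet? tl (i + j) ≠ PySem.List.pyGet? pl j
    · have hm : pvMis tl pl i j = 1 := by simp only [pvMis, if_pos h]
      by_cases h2 : c + 1 > md
      · rw [show pvStepA tl pl md i (c, false) j = (c + 1, true) from by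
            simp [pvStepA, h, h2]]
        rw [pvStuck, hm]
        simp only []
        omega
      · rw [show pvStepA tl pl md i (c, false) j = (c + 1, false) from by
            simp [pvStepA, h, h2]]
        rw [ih, hm]
        omega
    · have hm : pvMis tl pl i j = 0 := by simp only [pvMis, if_neg h]
      rw [show pvStepA tl pl md i (c, false) j = (c, false) from by simp [pvStepA, h]]
      rw [ih, hm]
      omega

-- A is the filter of the alignment range by the inner-loop test
theorem pvA_eq (p t : String) (md : Int) :
    naive_hamming p t md
      = (PySem.List.pyRange 0 ((t.toList.length : Int) - (p.toList.length : Int) + 1) 1).filter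
          (fun i => decide
            (((PySem.List.pyRange 0 ((p.toList.length : Int)) 1).foldl
                (pvStepA t.toList p.toList md i) ((0 : Int), false)).1 ≤ md)) := by
  have h := PySem.List.foldl_append_ite_eq_filter
      (l := PySem.List.pyRange 0 ((t.toList.length : Int) - (p.toList.length : Int) + 1) 1)
      (p := fun i => ((PySem.List.pyRange 0 ((p.toList.length : Int)) 1).foldl
              (pvStepA t.toList p.toList md i) ((0 : Int), false)).1 ≤ md)
      (acc := [])
  simpa using h

-- mapping over an enumerated range-comprehension list
theorem pvMapEnumMap {β : Type} (n : Nat) (g : Int → Int) (f : Int × Int → β) :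
    (PySem.List.enumerate ((PySem.List.pyRange 0 (n : Int) 1).map g) 0).map f
      = (PySem.List.pyRange 0 (n : Int) 1).map (fun i => f (i, g i)) := by
  rw [PySem.List.enumerate_eq_map_pyRange (d := 0)]
  have hlen : PySem.List.len ((PySem.List.pyRange 0 (n : Int) 1).map g) = (n : Int) := by
    simp [PySem.List.length_pyRange_one]
  rw [hlen, List.map_map]
  refine List.map_congr_left ?_
  intro j hj
  rw [PySem.List.mem_pyRange_one] at hj
  simp [PySem.List.pyGetD_map_pyRange_of_nonneg g (n : Int) j 0 hj.1 hj.2]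

-- B's column-by-column fold computes, at each alignment, the sum of mismatch indicators
theorem pvBfold (tl : List Char) (n : Nat) (ps : List Char) (s : Int) (g : Int → Int) :
    (PySem.List.enumerate ps s).foldl
      (fun nmm jp =>
        (PySem.List.enumerate nmm 0).map
          (fun ic => ic.2 + if PySem.List.pyGet? tl (ic.1 + jp.1) ≠ some jp.2 then 1 else 0))
      ((PySem.List.pyRange 0 (n : Int) 1).map g)
    = (PySem.List.pyRange 0 (n : Int) 1).map
        (fun i => g i + ((PySem.List.enumerate ps s).map
          (fun jp => if PySem.List.pyGet? tl (i + jp.1) ≠ some jp.2 then (1 : Int) else 0)).sum) := by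
  induction ps generalizing s g with
  | nil => simp [PySem.List.enumerate_nil]
  | cons x ps ih =>
    rw [PySem.List.enumerate_cons, List.foldl_cons, pvMapEnumMap, ih]
    refine List.map_congr_left ?_
    intro i _
    simp [add_assoc]

-- the enumerate-based mismatch sum equals the range-based one
theorem pvSumEnum (tl pl : List Char) (i : Int) :
    ((PySem.List.enumerate pl 0).map
        (fun jp => if PySem.List.pyGet? tl (i + jp.1) ≠ some jp.2 then (1 : Int) else 0)).sum
      = ((PySem.List.pyRange 0 (pl.length : Int) 1).map (pvMis tl pl i)).sum := by
  rw [PySem.List.enumerate_eq_map_pyRange (d := 'a'), List.map_map]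
  have hlen : PySem.List.len pl = (pl.length : Int) := by simp
  rw [hlen]
  congr 1
  refine List.map_congr_left ?_
  intro j hj
  rw [PySem.List.mem_pyRange_one] at hj
  obtain ⟨h0, h1⟩ := hj
  obtain ⟨k, rfl⟩ : ∃ k : Nat, j = (k : Int) := ⟨j.toNat, (Int.toNat_of_nonneg h0).symm⟩
  have hk : k < pl.length := by exact_mod_cast h1
  simp [Function.comp, pvMis, List.getElem?_eq_getElem hk]

-- ===== VERDICT (by name: the statement is the Claim_ definition above) =====
theorem naive_hamming_spec : Claim_equal_naive_hamming := by
  intro p t md _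
  unfold Spec_naive_hamming
  rw [pvA_eq]
  simp only [naive_hamming_alt]
  by_cases hn : (t.toList.length : Int) - (p.toList.length : Int) + 1 ≤ 0
  · rw [if_pos hn, PySem.List.pyRange_one_eq_nil hn]
    rfl
  · rw [if_neg hn]
    have hn' : 0 < (t.toList.length : Int) - (p.toList.length : Int) + 1 := by omega
    have hcast : ((((t.toList.length : Int) - (p.toList.length : Int) + 1).toNat : Int))
        = (t.toList.length : Int) - (p.toList.length : Int) + 1 :=
      Int.toNat_of_nonneg (le_of_lt hn')
    have hrep : List.replicate ((t.toList.length : Int) - (p.toList.length : Int) + 1).toNat (0 : Int)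
        = (PySem.List.pyRange 0
            ((((t.toList.length : Int) - (p.toList.length : Int) + 1).toNat : Int)) 1).map
            (fun _ => (0 : Int)) := by
      have htn : ((((t.toList.length : Int) - (p.toList.length : Int) + 1).toNat : Int) - 0).toNat
          = ((t.toList.length : Int) - (p.toList.length : Int) + 1).toNat := by omega
      rw [List.map_const', PySem.List.length_pyRange_one, htn]
    rw [hrep, pvBfold, hcast]
    refine List.filter_congr ?_
    intro i hi
    rw [PySem.List.mem_pyRange_one] at hi
    rw [PySem.List.pyGetD_map_pyRange_of_nonneg _ _ _ _ hi.1 hi.2]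
    simp only [decide_eq_decide]
    rw [pvInner_le_iff, pvSumEnum]
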